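-- pv_equiv track=rewrite | github.com/SwissArmyKnifeTD/HoudiniPythonTools | scripts/python/tools/ls_tex_to_mtlx.py | _find_bump_normal_textures
-- ===== SOURCE A (Python) =====
-- def _find_bump_normal_textures(material_lib_info):
--     """
--     Find the bump and the normal textures
--     Args:
--         material_lib_info : dictionnary that contains the info regarding the material
--     Return:
--         dictionnary with bump and normal values
--     """
--     texture_type_sorted = {
--         "texturesBump" : ["bump", "bmp", "height", "heightmap"],
--         "texturesNormal" : ["normal", "nor", "nrm", "nrml", "norm"]
--     }
--
--     result = {
--         "bump" : None,
--         "normal" : None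
--     }
--
--     for texture in material_lib_info:
--         for texture_name, texture_value in texture_type_sorted.items():
--             if texture in texture_value:
--                 key = "bump" if texture_name == "texturesBump" else "normal"
--                 result[key] = texture
--
--     return result
-- ===== SOURCE B (Python) =====
-- def _find_bump_normal_textures(material_lib_info):
--     """
--     Find the bump and the normal textures.
--     Instead of one forward pass that keeps overwriting a result dict, run two
--     independent backward searches: the last matching texture of a category is
--     the FIRST match when scanning the reversed list, so each slot is found by
--     a single early-exiting search.
--     """
--     bump_keywords = ("bump", "bmp", "height", "heightmap")
--     normal_keywords = ("normal", "nor", "nrm", "nrml", "norm")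
--     rev = material_lib_info[::-1]
--     bump = next((t for t in rev if t in bump_keywords), None)
--     normal = next((t for t in rev if t in normal_keywords), None)
--     return {"bump": bump, "normal": normal}
-- ===== Notes on version B (the rewrite author's own statement) =====
-- stated objective: alternative
-- what changed: Replaced A's single forward pass with a nested category loop and last-write-wins dict updates by two independent early-exiting backward searches (first match in the reversed list = A's last overwrite), assembling the result dict once at the end.
import Mathlib
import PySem

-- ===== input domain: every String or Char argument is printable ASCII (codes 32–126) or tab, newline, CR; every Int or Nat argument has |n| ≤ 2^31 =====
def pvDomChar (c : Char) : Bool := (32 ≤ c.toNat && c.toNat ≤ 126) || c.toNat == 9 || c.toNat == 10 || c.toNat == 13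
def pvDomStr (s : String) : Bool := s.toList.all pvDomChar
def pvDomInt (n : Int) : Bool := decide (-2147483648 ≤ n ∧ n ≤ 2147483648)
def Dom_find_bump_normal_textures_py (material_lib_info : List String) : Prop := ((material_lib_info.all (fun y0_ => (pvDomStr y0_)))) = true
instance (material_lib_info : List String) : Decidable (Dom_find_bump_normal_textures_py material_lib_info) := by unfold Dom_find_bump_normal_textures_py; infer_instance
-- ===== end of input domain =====

-- B replaces A's forward pass with nested category loop and overwriting dict updates by two
-- independent backward first-match searches, one per slot (objective: alternative, not faster).

-- ===== PORT A =====
def find_bump_normal_textures_py (material_lib_info : List String) : List (String × Option String) :=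
  let texture_type_sorted : List (String × List String) :=
    [("texturesBump", ["bump", "bmp", "height", "heightmap"]),
     ("texturesNormal", ["normal", "nor", "nrm", "nrml", "norm"])]
  let result : PySem.Dict String (Option String) :=
    PySem.Dict.mk [("bump", none), ("normal", none)]
  let final := material_lib_info.foldl (fun result texture =>
    texture_type_sorted.foldl (fun result p =>
      if texture ∈ p.2 then
        result.insert (if p.1 == "texturesBump" then "bump" else "normal") (some texture)
      else result) result) result
  final.items

-- ===== PORT B =====
def find_bump_normal_textures_py_alt (material_lib_info : List String) : List (String × Option String) :=
  let bump_keywords : List String := ["bump", "bmp", "height", "heightmap"]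
  let normal_keywords : List String := ["normal", "nor", "nrm", "nrml", "norm"]
  -- material_lib_info[::-1] ported as List.reverse (exact)
  let rev := material_lib_info.reverse
  -- next((t for t in rev if t in kws), None) ported as List.find? (exact: first match or none)
  let bump := rev.find? (fun t => bump_keywords.contains t)
  let normal := rev.find? (fun t => normal_keywords.contains t)
  [("bump", bump), ("normal", normal)]

-- ===== PRECONDITION & SPEC =====
def Spec_find_bump_normal_textures_py (material_lib_info : List String) (out : List (String × Option String)) : Prop := out = find_bump_normal_textures_py_alt material_lib_info
instance (material_lib_info : List String) (out : List (String × Option String)) : Decidable (Spec_find_bump_normal_textures_py material_lib_info out) := by unfold Spec_find_bump_normal_textures_py; infer_instance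

-- ===== CLAIM (what is proved, stated in full; the proofs are below) =====
def Claim_equal_find_bump_normal_textures_py : Prop := ∀ (material_lib_info : List String), Dom_find_bump_normal_textures_py material_lib_info → Spec_find_bump_normal_textures_py material_lib_info (find_bump_normal_textures_py material_lib_info)

-- ===== LEMMAS AND PROOFS =====

-- A's inner category loop on the two-key dict state: updates the matching slot, keeps the other.
theorem pv_step (t : String) (b n : Option String) :
    ([("texturesBump", ["bump", "bmp", "height", "heightmap"]),
      ("texturesNormal", ["normal", "nor", "nrm", "nrml", "norm"])] : List (String × List String)).foldl
      (fun result p =>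
        if t ∈ p.2 then
          result.insert (if p.1 == "texturesBump" then "bump" else "normal") (some t)
        else result) (PySem.Dict.mk [("bump", b), ("normal", n)])
    = PySem.Dict.mk
        [("bump", if (["bump", "bmp", "height", "heightmap"] : List String).contains t then some t else b),
         ("normal", if (["normal", "nor", "nrm", "nrml", "norm"] : List String).contains t then some t else n)] := by
  by_cases h1 : t = "bump" <;> by_cases h2 : t = "bmp" <;> by_cases h3 : t = "height" <;>
    by_cases h4 : t = "heightmap" <;> by_cases h5 : t = "normal" <;> by_cases h6 : t = "nor" <;>
    by_cases h7 : t = "nrm" <;> by_cases h8 : t = "nrml" <;> by_cases h9 : t = "norm" <;>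
    simp_all [List.foldl, PySem.Dict.insert, List.contains_eq_mem]

-- The backward first match with fallback, read off A's forward overwriting loop.
theorem pv_find_rev_cons {α : Type} (p : α → Bool) (t : α) (l : List α) (d : Option α) :
    (((t :: l).reverse.find? p).elim d some)
    = ((l.reverse.find? p).elim (if p t then some t else d) some) := by
  rw [List.reverse_cons, List.find?_append]
  cases h : l.reverse.find? p <;> by_cases hp : p t <;> simp [hp, Option.elim]

-- Loop invariant: A's fold from any two-slot state equals the two backward searches with fallbacks.
theorem pv_fold_eq (l : List String) (b n : Option String) :
    (l.foldl (fun result texture =>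
      ([("texturesBump", ["bump", "bmp", "height", "heightmap"]),
        ("texturesNormal", ["normal", "nor", "nrm", "nrml", "norm"])] : List (String × List String)).foldl
        (fun result p =>
          if texture ∈ p.2 then
            result.insert (if p.1 == "texturesBump" then "bump" else "normal") (some texture)
          else result) result) (PySem.Dict.mk [("bump", b), ("normal", n)]))
    = PySem.Dict.mk
        [("bump", (l.reverse.find? (fun t => (["bump", "bmp", "height", "heightmap"] : List String).contains t)).elim b some),
         ("normal", (l.reverse.find? (fun t => (["normal", "nor", "nrm", "nrml", "norm"] : List String).contains t)).elim n some)] := by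
  induction l generalizing b n with
  | nil => simp
  | cons t l ih =>
      rw [List.foldl_cons, pv_step, ih, pv_find_rev_cons, pv_find_rev_cons]

theorem find_bump_normal_textures_py_spec : Claim_equal_find_bump_normal_textures_py := by
  intro l _
  unfold Spec_find_bump_normal_textures_py find_bump_normal_textures_py find_bump_normal_textures_py_alt
  dsimp only
  rw [pv_fold_eq]
  cases h1 : l.reverse.find? (fun t => (["bump", "bmp", "height", "heightmap"] : List String).contains t) <;>
    cases h2 : l.reverse.find? (fun t => (["normal", "nor", "nrm", "nrml", "norm"] : List String).contains t) <;>
      simp [PySem.Dict.items, Option.elim]
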